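-- pv_equiv track=rewrite | github.com/Raisin228/determinant_of_matrix | main.py | zero_column
-- ===== SOURCE A (Python) =====
-- def zero_column(mat):
--     counter, max_counter, ind_column = 0, 0, 0
--     for k in range(len(mat)):
--         for q in range(len(mat[k])):
--             if mat[q][k] == 0:
--                 counter += 1
--             if max_counter < counter:
--                 max_counter = counter
--                 ind_column = k
--         counter = 0
--     return ind_column, max_counter
-- ===== SOURCE B (Python) =====
-- def zero_column(mat):
--     # Transposed traversal: one row-major pass tallies zeros into a per-column
--     # table, then a separate scan picks the first column with the most zeros.
--     counts = [0] * len(mat)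
--     for row in mat:
--         for k, v in enumerate(row):
--             counts[k] += (v == 0)
--     best_col, best = 0, 0
--     for k, c in enumerate(counts):
--         if best < c:
--             best_col, best = k, c
--     return best_col, best
-- ===== Notes on version B (the rewrite author's own statement) =====
-- stated objective: alternative
-- what changed: B traverses the matrix in the transposed (row-major) order, tallying zeros of each column into a table during a single pass over the rows, then scans that table once for the first maximum, instead of A's column-major nested loops with a streaming argmax update inside the inner loop.
import Mathlib
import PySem

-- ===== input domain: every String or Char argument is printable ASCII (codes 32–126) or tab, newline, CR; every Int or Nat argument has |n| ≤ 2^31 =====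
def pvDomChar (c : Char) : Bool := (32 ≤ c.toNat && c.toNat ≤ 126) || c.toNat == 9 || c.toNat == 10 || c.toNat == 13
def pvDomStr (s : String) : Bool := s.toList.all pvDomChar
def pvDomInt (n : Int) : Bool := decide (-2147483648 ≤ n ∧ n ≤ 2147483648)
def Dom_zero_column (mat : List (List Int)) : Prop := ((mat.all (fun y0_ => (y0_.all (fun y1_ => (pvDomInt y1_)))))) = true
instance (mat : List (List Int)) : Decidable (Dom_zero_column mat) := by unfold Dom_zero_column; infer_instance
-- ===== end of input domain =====

-- B tallies zeros per column in one row-major (transposed) pass and then scans the table for the first maximum; same cost as A's column-major streaming argmax, different traversal.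


-- ===== PORT A =====
def zero_column (mat : List (List Int)) : Int × Int :=
  let fin := (PySem.List.pyRange 0 (PySem.List.len mat) 1).foldl
    (fun (st : Int × Int × Int) k =>
      let st' := (PySem.List.pyRange 0 (PySem.List.len (PySem.List.pyGetD mat k [])) 1).foldl
        (fun (s : Int × Int × Int) q =>
          let c := if PySem.List.pyGetD (PySem.List.pyGetD mat q []) k 0 = 0 then s.1 + 1 else s.1
          if s.2.1 < c then (c, c, k) else (c, s.2.1, s.2.2))
        st
      (0, st'.2.1, st'.2.2))
    (0, 0, 0)
  (fin.2.2, fin.2.1)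

-- ===== PORT B =====
-- counts[k] += 1 is pySetD/pyGetD (the IndexError case is total-ised; Pre_ keeps every index in range).
def zero_column_alt (mat : List (List Int)) : Int × Int :=
  let counts := mat.foldl
    (fun (cs : List Int) row =>
      (PySem.List.enumerate row).foldl
        (fun (cs' : List Int) kv =>
          PySem.List.pySetD cs' kv.1 (PySem.List.pyGetD cs' kv.1 0 + (if kv.2 = 0 then 1 else 0)))
        cs)
    (List.replicate mat.length 0)
  (PySem.List.enumerate counts).foldl
    (fun (st : Int × Int) kc => if st.2 < kc.2 then (kc.1, kc.2) else st)
    (0, 0)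

-- ===== PRECONDITION & SPEC =====
-- Pre_ excludes exactly the ragged inputs on which the Python A raises IndexError at mat[q][k]
-- (q ≥ len(mat) or k ≥ len(mat[q])); A returns on every input satisfying Pre_.
def Pre_zero_column (mat : List (List Int)) : Prop :=
  ∀ k ∈ List.range mat.length, ∀ q ∈ List.range (mat.getD k []).length,
    q < mat.length ∧ k < (mat.getD q []).length
instance (mat : List (List Int)) : Decidable (Pre_zero_column mat) := by
  unfold Pre_zero_column; infer_instance
def pvWitness_zero_column : List (List Int) := [[0, 1], [1, 0]]

def Spec_zero_column (mat : List (List Int)) (out : Int × Int) : Prop := out = zero_column_alt mat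
instance (mat : List (List Int)) (out : Int × Int) : Decidable (Spec_zero_column mat out) := by unfold Spec_zero_column; infer_instance

-- ===== CLAIM (what is proved, stated in full; the proofs are below) =====
def Claim_equal_zero_column : Prop := ∀ (mat : List (List Int)), Dom_zero_column mat → Pre_zero_column mat → Spec_zero_column mat (zero_column mat)

-- ===== LEMMAS AND PROOFS =====

-- number of zeros in column k as A counts them (scanning rows q < len(mat[k]))
def zCnt (mat : List (List Int)) (k : Nat) : Int :=
  ((List.range (mat.getD k []).length).map
    (fun q => if (mat.getD q []).getD k 0 = 0 then (1 : Int) else 0)).sum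

-- number of zeros in column j as B counts them (one indicator per row)
def rInd (row : List Int) (j : Nat) : Int :=
  if j < row.length ∧ row.getD j 0 = 0 then 1 else 0

def cntB (mat : List (List Int)) (j : Nat) : Int := (mat.map (fun row => rInd row j)).sum

def zStep (cnt : Nat → Int) (p : Int × Int) (k : Nat) : Int × Int :=
  if p.1 < cnt k then (cnt k, (k : Int)) else p

def zSel (cnt : Nat → Int) (n : Nat) : Int × Int := (List.range n).foldl (zStep cnt) (0, 0)

-- B's inner-loop body and argmax-loop body, named for the lemmas
def rStep (cs' : List Int) (kv : Int × Int) : List Int :=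
  PySem.List.pySetD cs' kv.1 (PySem.List.pyGetD cs' kv.1 0 + (if kv.2 = 0 then 1 else 0))

def bStep (st : Int × Int) (kc : Int × Int) : Int × Int :=
  if st.2 < kc.2 then (kc.1, kc.2) else st

-- contribution of one row, scanned from start index i, to column j
def rCnt (row : List Int) (i j : Nat) : Int :=
  if i ≤ j ∧ j - i < row.length ∧ row.getD (j - i) 0 = 0 then 1 else 0

-- ===== A-side characterisation =====

lemma sum_ite_nonneg (P : Nat → Prop) [DecidablePred P] (qs : List Nat) :
    0 ≤ (qs.map (fun q => if P q then (1 : Int) else 0)).sum := by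
  apply List.sum_nonneg
  intro x hx
  simp only [List.mem_map] at hx
  obtain ⟨q, -, rfl⟩ := hx
  split <;> norm_num

lemma inner_fold (P : Nat → Prop) [DecidablePred P] (kI : Int) :
    ∀ (qs : List Nat) (c m i : Int), c ≤ m →
      qs.foldl (fun (s : Int × Int × Int) q =>
          let c' := if P q then s.1 + 1 else s.1
          if s.2.1 < c' then (c', c', kI) else (c', s.2.1, s.2.2)) (c, m, i)
        = (c + (qs.map (fun q => if P q then (1 : Int) else 0)).sum,
           if m < c + (qs.map (fun q => if P q then (1 : Int) else 0)).sum
           then (c + (qs.map (fun q => if P q then (1 : Int) else 0)).sum, kI)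
           else (m, i)) := by
  intro qs
  induction qs with
  | nil =>
    intro c m i hcm
    simp only [List.foldl_nil, List.map_nil, List.sum_nil, add_zero]
    rw [if_neg (by omega)]
  | cons q qs ih =>
    intro c m i hcm
    simp only [List.foldl_cons, List.map_cons, List.sum_cons]
    have hS := sum_ite_nonneg P qs
    set S := (qs.map (fun q => if P q then (1 : Int) else 0)).sum with hSdef
    by_cases hP : P q
    · simp only [if_pos hP]
      have h3 : c + 1 + S = c + (1 + S) := by ring
      by_cases hlt : m < c + 1
      · rw [if_pos hlt, ih (c + 1) (c + 1) kI le_rfl,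
          if_pos (show m < c + (1 + S) by omega), h3]
        by_cases h2 : c + 1 < c + (1 + S)
        · rw [if_pos h2]
        · rw [if_neg h2]
          have hS0 : S = 0 := by omega
          simp [hS0]
      · rw [if_neg hlt, ih (c + 1) m i (by omega), h3]
    · simp only [if_neg hP]
      rw [if_neg (show ¬ m < c by omega), ih c m i hcm]
      simp only [zero_add]

lemma outer_fold (mat : List (List Int)) :
    ∀ (ks : List Nat) (m i : Int), 0 ≤ m →
      ks.foldl (fun (st : Int × Int × Int) k =>
          let st' := (List.range (mat.getD k []).length).foldl
            (fun (s : Int × Int × Int) q =>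
              let c := if (mat.getD q []).getD k 0 = 0 then s.1 + 1 else s.1
              if s.2.1 < c then (c, c, (k : Int)) else (c, s.2.1, s.2.2)) st
          (0, st'.2.1, st'.2.2)) (0, m, i)
        = (0, ks.foldl (zStep (zCnt mat)) (m, i)) := by
  intro ks
  induction ks with
  | nil => intro m i hm; rfl
  | cons k ks ih =>
    intro m i hm
    simp only [List.foldl_cons]
    rw [inner_fold (fun q => (mat.getD q []).getD k 0 = 0) (k : Int)
        (List.range (mat.getD k []).length) 0 m i hm]
    have hcnt : ((List.range (mat.getD k []).length).map
        (fun q => if (mat.getD q []).getD k 0 = 0 then (1 : Int) else 0)).sum = zCnt mat k := rfl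
    have hc0 : 0 ≤ zCnt mat k := sum_ite_nonneg _ _
    by_cases h : m < zCnt mat k
    · rw [hcnt]
      simp only [zero_add, if_pos h]
      rw [ih (zCnt mat k) (k : Int) hc0]
      have : zStep (zCnt mat) (m, i) k = (zCnt mat k, (k : Int)) := by
        unfold zStep; rw [if_pos h]
      rw [this]
    · rw [hcnt]
      simp only [zero_add, if_neg h]
      rw [ih m i hm]
      have : zStep (zCnt mat) (m, i) k = (m, i) := by
        unfold zStep; rw [if_neg h]
      rw [this]

lemma A_char (mat : List (List Int)) :
    zero_column mat = ((zSel (zCnt mat) mat.length).2, (zSel (zCnt mat) mat.length).1) := by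
  unfold zero_column
  simp only [PySem.List.len_eq, PySem.List.pyRange_zero, Int.toNat_natCast, List.foldl_map,
    PySem.List.pyGetD_natCast]
  rw [outer_fold mat (List.range mat.length) 0 0 le_rfl]
  rfl

-- ===== B-side characterisation =====

lemma rStep_map (n : Nat) (f : Nat → Int) (i : Nat) (x : Int) :
    rStep ((List.range n).map f) (((i : Nat) : Int), x)
      = (List.range n).map (fun j => f j + if j = i ∧ x = 0 then 1 else 0) := by
  unfold rStep
  simp only [PySem.List.pySetD_natCast, PySem.List.pyGetD_natCast]
  apply List.ext_getElem
  · simp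
  · intro j h1 h2
    have hj : j < n := by simpa using h2
    rw [List.getElem_set]
    by_cases hij : i = j
    · subst hij
      rw [if_pos rfl, List.getD_eq_getElem _ _ (by simpa using hj)]
      simp
    · rw [if_neg hij]
      have hji : ¬ j = i := fun h => hij h.symm
      simp [hji]

lemma rCnt_cons (x : Int) (xs : List Int) (i j : Nat) :
    (if j = i ∧ x = 0 then (1 : Int) else 0) + rCnt xs (i + 1) j = rCnt (x :: xs) i j := by
  unfold rCnt
  rcases (by omega : j < i ∨ j = i ∨ i < j) with h | h | h
  · have c1 : ¬(j = i ∧ x = 0) := by rintro ⟨rfl, -⟩; omega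
    have c2 : ¬(i + 1 ≤ j ∧ j - (i + 1) < xs.length ∧ xs.getD (j - (i + 1)) 0 = 0) := by
      rintro ⟨h1, -⟩; omega
    have c3 : ¬(i ≤ j ∧ j - i < (x :: xs).length ∧ (x :: xs).getD (j - i) 0 = 0) := by
      rintro ⟨h1, -⟩; omega
    rw [if_neg c1, if_neg c2, if_neg c3]
    simp
  · rcases h with rfl
    have c2 : ¬(j + 1 ≤ j ∧ j - (j + 1) < xs.length ∧ xs.getD (j - (j + 1)) 0 = 0) := by
      rintro ⟨h1, -⟩; omega
    rw [if_neg c2, add_zero, Nat.sub_self, List.getD_cons_zero]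
    by_cases hx : x = 0
    · rw [if_pos ⟨rfl, hx⟩, if_pos ⟨le_rfl, by simp, hx⟩]
    · rw [if_neg (fun hc => hx hc.2), if_neg (fun hc => hx hc.2.2)]
  · have c1 : ¬(j = i ∧ x = 0) := by rintro ⟨rfl, -⟩; omega
    rw [if_neg c1, zero_add]
    have h1 : j - i = (j - (i + 1)) + 1 := by omega
    rw [h1, List.getD_cons_succ, List.length_cons]
    by_cases hc : i + 1 ≤ j ∧ j - (i + 1) < xs.length ∧ xs.getD (j - (i + 1)) 0 = 0
    · rw [if_pos hc, if_pos ⟨by omega, by omega, hc.2.2⟩]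
    · rw [if_neg hc, if_neg (fun hc' => hc ⟨by omega, by omega, hc'.2.2⟩)]

lemma rowFold_map (n : Nat) :
    ∀ (row : List Int) (i : Nat) (f : Nat → Int),
      (PySem.List.enumerate row (i : Int)).foldl rStep ((List.range n).map f)
        = (List.range n).map (fun j => f j + rCnt row i j) := by
  intro row
  induction row with
  | nil =>
    intro i f
    rw [PySem.List.enumerate_nil, List.foldl_nil]
    apply List.map_congr_left
    intro j _
    unfold rCnt
    rw [if_neg (by intro h; exact absurd h.2.1 (by simp))]
    simp
  | cons x xs ih =>
    intro i f
    rw [PySem.List.enumerate_cons, List.foldl_cons, rStep_map n f i x,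
      show (i : Int) + 1 = ((i + 1 : Nat) : Int) by push_cast; ring,
      ih (i + 1) (fun j => f j + if j = i ∧ x = 0 then 1 else 0)]
    apply List.map_congr_left
    intro j _
    rw [add_assoc, rCnt_cons]

lemma rCnt_zero (row : List Int) (j : Nat) : rCnt row 0 j = rInd row j := by
  unfold rCnt rInd
  simp

lemma foldRows (n : Nat) :
    ∀ (rows : List (List Int)) (f : Nat → Int),
      rows.foldl (fun (cs : List Int) row => (PySem.List.enumerate row).foldl rStep cs)
          ((List.range n).map f)
        = (List.range n).map (fun j => f j + (rows.map (fun row => rInd row j)).sum) := by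
  intro rows
  induction rows with
  | nil =>
    intro f
    simp
  | cons row rows ih =>
    intro f
    rw [List.foldl_cons]
    have he : (PySem.List.enumerate row).foldl rStep ((List.range n).map f)
        = (List.range n).map (fun j => f j + rCnt row 0 j) := rowFold_map n row 0 f
    rw [he, ih (fun j => f j + rCnt row 0 j)]
    apply List.map_congr_left
    intro j _
    simp only [List.map_cons, List.sum_cons, rCnt_zero]
    ring

lemma bFold (c : Nat → Int) :
    ∀ (ks : List Nat) (acc : Int × Int),
      (ks.foldl (fun st k => bStep st (((k : Nat) : Int), c k)) acc)
        = Prod.swap (ks.foldl (zStep c) acc.swap) := by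
  intro ks
  induction ks with
  | nil => intro acc; rfl
  | cons k ks ih =>
    intro acc
    rw [List.foldl_cons, List.foldl_cons, ih]
    congr 1
    unfold bStep zStep
    obtain ⟨a1, a2⟩ := acc
    simp only [Prod.swap_prod_mk]
    split <;> rfl

lemma finalFold (c : Nat → Int) (n : Nat) :
    (PySem.List.enumerate ((List.range n).map c)).foldl
        (fun (st : Int × Int) kc => if st.2 < kc.2 then (kc.1, kc.2) else st) (0, 0)
      = Prod.swap ((List.range n).foldl (zStep c) (0, 0)) := by
  rw [PySem.List.enumerate_eq_map_pyRange _ (0 : Int)]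
  simp only [PySem.List.len_eq, List.length_map, List.length_range]
  rw [PySem.List.pyRange_zero_nat, List.map_map, List.foldl_map]
  refine (PySem.List.foldl_congr_mem (List.range n) _
      (fun st k => bStep st (((k : Nat) : Int), c k)) (0, 0) ?_).trans ?_
  · intro acc k hk
    simp only [Function.comp_apply, bStep, PySem.List.pyGetD_natCast,
      PySem.List.getD_map_range c n k 0 (List.mem_range.mp hk)]
  · exact bFold c (List.range n) (0, 0)

lemma B_char (mat : List (List Int)) :
    zero_column_alt mat = ((zSel (cntB mat) mat.length).2, (zSel (cntB mat) mat.length).1) := by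
  have hcounts : mat.foldl
      (fun (cs : List Int) row =>
        (PySem.List.enumerate row).foldl
          (fun (cs' : List Int) kv =>
            PySem.List.pySetD cs' kv.1 (PySem.List.pyGetD cs' kv.1 0 + (if kv.2 = 0 then 1 else 0)))
          cs)
      (List.replicate mat.length 0)
      = (List.range mat.length).map (fun j => cntB mat j) := by
    have hrepl : List.replicate mat.length (0 : Int)
        = (List.range mat.length).map (fun _ => 0) := by
      rw [show (fun (_ : Nat) => (0 : Int)) = Function.const Nat (0 : Int) from rfl,
        List.map_const, List.length_range]
    rw [show (fun (cs' : List Int) (kv : Int × Int) =>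
          PySem.List.pySetD cs' kv.1 (PySem.List.pyGetD cs' kv.1 0 + (if kv.2 = 0 then 1 else 0)))
        = rStep from rfl, hrepl, foldRows]
    apply List.map_congr_left
    intro j _
    simp [cntB]
  unfold zero_column_alt
  simp only [hcounts]
  rw [finalFold]
  rfl

-- ===== Pre_ makes the two counts agree =====

lemma map_getD_range {α β : Type} (l : List α) (g : α → β) (d : α) :
    l.map g = (List.range l.length).map (fun q => g (l.getD q d)) := by
  apply List.ext_getElem
  · simp
  · intro j h1 h2
    have hj : j < l.length := by simpa using h1
    simp only [List.getElem_map, List.getElem_range, List.getD_eq_getElem _ _ hj]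

lemma cnt_eq (mat : List (List Int)) (hpre : Pre_zero_column mat) :
    ∀ k < mat.length, zCnt mat k = cntB mat k := by
  intro k hk
  have hP : ∀ k' < mat.length, ∀ q' < (mat.getD k' []).length,
      q' < mat.length ∧ k' < (mat.getD q' []).length := by
    intro k' hk' q' hq'
    exact hpre k' (List.mem_range.mpr hk') q' (List.mem_range.mpr hq')
  unfold cntB
  rw [map_getD_range mat (fun row => rInd row k) []]
  set m := (mat.getD k []).length with hm
  have hmn : m ≤ mat.length := by
    by_cases h0 : m = 0
    · omega
    · have := (hP k hk (m - 1) (by omega)).1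
      omega
  unfold zCnt
  rw [show mat.length = m + (mat.length - m) by omega, List.range_add,
    List.map_append, List.sum_append]
  have hz : ((List.map (fun x => m + x) (List.range (mat.length - m))).map
      (fun q => rInd (mat.getD q []) k)).sum = 0 := by
    apply List.sum_eq_zero
    intro x hx
    simp only [List.mem_map, List.mem_range] at hx
    obtain ⟨q, ⟨t, ht, rfl⟩, rfl⟩ := hx
    unfold rInd
    rw [if_neg]
    rintro ⟨hklt, -⟩
    have := (hP (m + t) (by omega) k hklt).2
    omega
  rw [hz, add_zero]
  apply congrArg
  apply List.map_congr_left
  intro q hq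
  have hqm : q < m := List.mem_range.mp hq
  have hkl : k < (mat.getD q []).length := (hP k hk q hqm).2
  unfold rInd
  by_cases h : (mat.getD q []).getD k 0 = 0
  · rw [if_pos h, if_pos ⟨hkl, h⟩]
  · rw [if_neg h, if_neg (by tauto)]

-- ===== VERDICT (by name: the statement is the Claim_ definition above) =====
theorem zero_column_spec : Claim_equal_zero_column := by
  intro mat _ hpre
  unfold Spec_zero_column
  rw [A_char, B_char]
  have hsel : zSel (zCnt mat) mat.length = zSel (cntB mat) mat.length := by
    unfold zSel
    apply PySem.List.foldl_congr_mem
    intro acc k hk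
    unfold zStep
    rw [cnt_eq mat hpre k (List.mem_range.mp hk)]
  rw [hsel]
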